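-- pv_equiv track=rewrite | github.com/harikrishnaalvala/python-idp-set-3 | concatenation game/index.py | concated_lists
-- ===== SOURCE A (Python) =====
-- def concated_lists(sentence_list,max_length):
--     concated_list=[]
--     for i in range(max_length):
--         word=""
--         for j in sentence_list:
--             if len(j)>i:
--                 word+=j[i]
--         concated_list.append(word)
--     return concated_list
-- ===== SOURCE B (Python) =====
-- def concated_lists(sentence_list, max_length):
--     if max_length <= 0:
--         return []
--     cols = [[] for _ in range(max_length)]
--     for word in sentence_list:
--         for i, ch in enumerate(word[:max_length]):
--             cols[i].append(ch)
--     return ["".join(c) for c in cols]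
-- ===== Notes on version B (the rewrite author's own statement) =====
-- stated objective: faster
-- what changed: Instead of scanning the whole word list once per column (max_length * n character tests), B walks each word once, dropping each character into its column's list builder, then joins the builders.
import Mathlib
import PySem

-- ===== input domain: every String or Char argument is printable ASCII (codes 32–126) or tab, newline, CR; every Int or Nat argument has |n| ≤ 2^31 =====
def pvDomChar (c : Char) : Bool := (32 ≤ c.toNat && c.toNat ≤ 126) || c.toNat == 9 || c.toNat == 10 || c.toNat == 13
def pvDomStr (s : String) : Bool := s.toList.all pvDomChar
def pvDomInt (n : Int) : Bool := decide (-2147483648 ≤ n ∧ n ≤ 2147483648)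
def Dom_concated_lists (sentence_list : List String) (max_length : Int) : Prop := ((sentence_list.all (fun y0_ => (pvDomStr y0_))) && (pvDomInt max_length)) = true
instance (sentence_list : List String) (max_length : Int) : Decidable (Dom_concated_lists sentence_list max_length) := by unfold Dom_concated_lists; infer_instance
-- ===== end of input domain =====

-- ===== PORT A =====
-- Header: B builds the columns in a single pass over each word's characters (list builders then join),
-- instead of A's rescan of the whole word list per column; proved to return the same list.
def concated_lists (sentence_list : List String) (max_length : Int) : List String :=
  (PySem.List.pyRange 0 max_length 1).foldl
    (fun concated_list i =>
      let word : List Char := sentence_list.foldl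
        (fun word j =>
          if PySem.Str.len j > i then
            word ++ ((PySem.Str.pyGet? j i).elim [] (fun c => [c]))
          else word) []
      concated_list ++ [String.ofList word]) []

-- ===== PORT B =====
-- one column builder per position; pvUpd appends each character of a word to its column
def pvUpd : List (List Char) → List Char → List (List Char)
  | cols, [] => cols
  | [], _ => []
  | c :: cs, ch :: rest => (c ++ [ch]) :: pvUpd cs rest

def concated_lists_alt (sentence_list : List String) (max_length : Int) : List String :=
  if max_length ≤ 0 then []
  else
    let cols := sentence_list.foldl
      (fun cols j => pvUpd cols (j.toList.take max_length.toNat))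
      (List.replicate max_length.toNat [])
    cols.map (fun c => String.ofList c)

-- ===== PRECONDITION & SPEC =====
def Spec_concated_lists (sentence_list : List String) (max_length : Int) (out : List String) : Prop := out = concated_lists_alt sentence_list max_length
instance (sentence_list : List String) (max_length : Int) (out : List String) : Decidable (Spec_concated_lists sentence_list max_length out) := by unfold Spec_concated_lists; infer_instance

-- ===== CLAIM (what is proved, stated in full; the proofs are below) =====
def Claim_equal_concated_lists : Prop := ∀ (sentence_list : List String) (max_length : Int), Dom_concated_lists sentence_list max_length → Spec_concated_lists sentence_list max_length (concated_lists sentence_list max_length)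

-- ===== LEMMAS AND PROOFS =====

-- the character column at position k, in word order
def pvCol (sl : List String) (k : Nat) : List Char :=
  sl.flatMap (fun j => (j.toList[k]?).elim [] (fun c => [c]))

theorem pvInner_eq (sl : List String) (k : Nat) :
    ∀ w : List Char,
    sl.foldl (fun w j =>
      if PySem.Str.len j > (k : Int) then
        w ++ ((PySem.Str.pyGet? j (k : Int)).elim [] (fun c => [c]))
      else w) w = w ++ pvCol sl k := by
  induction sl with
  | nil => intro w; simp [pvCol]
  | cons j sl ih =>
    intro w
    rw [List.foldl_cons, ih]
    by_cases h : k < j.toList.length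
    · have hL : k < j.length := by simpa using h
      simp [pvCol, PySem.Str.len_eq, hL, List.getElem?_eq_getElem h]
    · have h2 : j.toList[k]? = none := List.getElem?_eq_none_iff.mpr (by omega)
      simp [pvCol, PySem.Str.len_eq, h, h2]

theorem pvA_eq (sl : List String) (m : Int) :
    concated_lists sl m = (List.range m.toNat).map (fun k => String.ofList (pvCol sl k)) := by
  unfold concated_lists
  rw [PySem.List.pyRange_one]
  simp only [Int.sub_zero, zero_add]
  induction (List.range m.toNat) using List.reverseRecOn with
  | nil => simp
  | append_singleton l k ih =>
    rw [List.map_append, List.foldl_append, ih, List.map_append]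
    simp only [List.map_cons, List.map_nil, List.foldl_cons, List.foldl_nil]
    rw [pvInner_eq]
    simp

theorem pvUpd_length (cols : List (List Char)) (chars : List Char) :
    (pvUpd cols chars).length = cols.length := by
  induction cols generalizing chars with
  | nil => cases chars <;> simp [pvUpd]
  | cons c cs ih => cases chars <;> simp [pvUpd, ih]

theorem pvUpd_getElem? (cols : List (List Char)) (chars : List Char) (k : Nat) :
    (pvUpd cols chars)[k]? =
      (cols[k]?).map (fun c => c ++ ((chars[k]?).elim [] (fun ch => [ch]))) := by
  induction cols generalizing chars k with
  | nil => cases chars <;> simp [pvUpd]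
  | cons c cs ih =>
    cases chars with
    | nil => cases k <;> simp [pvUpd]
    | cons ch rest =>
      cases k with
      | zero => simp [pvUpd]
      | succ k => simp [pvUpd, ih]

theorem pvFoldl_getElem? (n : Nat) (sl : List String) (k : Nat) :
    ∀ cols : List (List Char),
    (sl.foldl (fun cs j => pvUpd cs (j.toList.take n)) cols)[k]? =
      (cols[k]?).map (fun c =>
        c ++ sl.flatMap (fun j => ((j.toList.take n)[k]?).elim [] (fun ch => [ch]))) := by
  induction sl with
  | nil =>
    intro cols; cases h : cols[k]? <;> simp [h]
  | cons j sl ih =>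
    intro cols
    rw [List.foldl_cons, ih, pvUpd_getElem?]
    cases h : cols[k]? <;> simp [h, List.append_assoc]

theorem pvB_getElem? (sl : List String) (n k : Nat) (hk : k < n) :
    (sl.foldl (fun cs j => pvUpd cs (j.toList.take n)) (List.replicate n []))[k]? =
      some (pvCol sl k) := by
  rw [pvFoldl_getElem?]
  rw [List.getElem?_replicate_of_lt hk]
  simp only [Option.map_some, Option.some.injEq, List.nil_append]
  unfold pvCol
  congr 1
  funext j
  rw [List.getElem?_take_of_lt hk]

theorem pvFoldl_length (n : Nat) (sl : List String) :
    ∀ cols : List (List Char),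
    (sl.foldl (fun cs j => pvUpd cs (j.toList.take n)) cols).length = cols.length := by
  induction sl with
  | nil => intro cols; rfl
  | cons j sl ih => intro cols; rw [List.foldl_cons, ih, pvUpd_length]

-- ===== VERDICT (by name: the statement is the Claim_ definition above) =====
theorem concated_lists_spec : Claim_equal_concated_lists := by
  intro sl m _
  unfold Spec_concated_lists
  rw [pvA_eq]
  unfold concated_lists_alt
  by_cases hm : m ≤ 0
  · simp [hm, Int.toNat_of_nonpos hm]
  · simp only [hm, if_false]
    apply List.ext_getElem?
    intro k
    rw [List.getElem?_map, List.getElem?_map]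
    by_cases hk : k < m.toNat
    · rw [pvB_getElem? sl m.toNat k hk, List.getElem?_range hk]
      rfl
    · rw [List.getElem?_eq_none_iff.mpr (by simpa using hk),
          List.getElem?_eq_none_iff.mpr (by rw [pvFoldl_length]; simpa using hk)]
      rfl
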